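-- pv_equiv track=rewrite | github.com/JulianChia/ADP | adp/functions/duplicates_finder_concurrent.py | reshape_list1d
-- ===== SOURCE A (Python) =====
-- def reshape_list1d(list1d: list, n: int) -> list:
--     """Function to reshape a 1D list into a 2D list with n number of
--     sub-lists of elements."""
--
--     if len(list1d) < n:
--         raise ValueError(
--             'Size of list1d needs to be greater than or equal to n.')
--
--     sub_list_size = len(list1d) // n
--     remainder = len(list1d) % n
--     new_list = []
--
--     # How to handle elements of list1d that is divisible by n.
--     for i in range(0, len(list1d) - remainder, sub_list_size):
--         new_list.append(list(list1d[i: i + sub_list_size]))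
--     # Insert each remainder elements into each sub_list of new_list.
--     if remainder > 0:
--         for en, m in enumerate(list1d[-remainder:]):
--             new_list[en].extend([m])
--
--     return new_list
-- ===== SOURCE B (Python) =====
-- def reshape_list1d(list1d: list, n: int) -> list:
--     """Function to reshape a 1D list into a 2D list with n number of
--     sub-lists of elements."""
--
--     if len(list1d) < n:
--         raise ValueError(
--             'Size of list1d needs to be greater than or equal to n.')
--
--     q = len(list1d) // n
--     # Scatter pass: each element is sent straight to its destination row
--     # (index i goes to row i//q for the body, row i - n*q for the tail),
--     # grouped in a dict; then the rows are read off in order.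
--     rows = {}
--     for i, x in enumerate(list1d):
--         j = i // q if i < n * q else i - n * q
--         rows.setdefault(j, []).append(x)
--     return [rows.get(j, []) for j in range(n)]
-- ===== Notes on version B (the rewrite author's own statement) =====
-- stated objective: alternative
-- what changed: A builds the rows by slicing chunks in one loop and then runs a second patch loop mutating the first r rows; B makes a single scatter pass over the elements, computing each element's destination row index and grouping them in a dict, then reads the rows off in order.
-- crash fix: On ([], n) with n < 0, A raises ValueError (range() arg 3 must not be zero, since sub_list_size is 0) while B's scatter loop is empty and the row read-off over range(n) yields []. — e.g. on reshape_list1d([], -1): A raises ValueError, B returns []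
import Mathlib
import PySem

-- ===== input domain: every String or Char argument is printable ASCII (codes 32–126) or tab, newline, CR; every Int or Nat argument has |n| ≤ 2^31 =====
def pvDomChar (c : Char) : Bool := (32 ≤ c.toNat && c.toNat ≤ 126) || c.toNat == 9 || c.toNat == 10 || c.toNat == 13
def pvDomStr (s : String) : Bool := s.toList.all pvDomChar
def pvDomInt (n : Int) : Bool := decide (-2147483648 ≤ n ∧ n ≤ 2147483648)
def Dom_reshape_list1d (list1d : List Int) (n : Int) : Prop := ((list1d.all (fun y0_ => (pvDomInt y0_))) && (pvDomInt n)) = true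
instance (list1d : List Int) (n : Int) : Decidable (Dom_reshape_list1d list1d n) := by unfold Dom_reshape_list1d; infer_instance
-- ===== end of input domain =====

-- B replaces A's build-then-patch two loops by a single scatter pass grouping each
-- element into its destination row via a dict; objective: alternative (same cost).


-- ===== PORT A =====
def reshape_list1d (list1d : List Int) (n : Int) : List (List Int) :=
  let len : Int := list1d.length
  if len < n then []  -- raise ValueError (excluded by Pre_)
  else
    let sub_list_size := PySem.Int.floordiv len n
    let remainder := PySem.Int.mod len n
    let new_list := (PySem.List.pyRange 0 (len - remainder) sub_list_size).foldl
      (fun acc i => acc ++ [PySem.List.slice list1d (some i) (some (i + sub_list_size))]) []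
    if remainder > 0 then
      -- for en, m in enumerate(list1d[-remainder:]): new_list[en].extend([m])
      -- new_list[en] is always in range under Pre_; pyGetD/pySetD port the subscripts
      (PySem.List.enumerate (PySem.List.slice list1d (some (-remainder)) none) 0).foldl
        (fun acc p => PySem.List.pySetD acc p.1 (PySem.List.pyGetD acc p.1 [] ++ [p.2])) new_list
    else new_list

-- ===== PORT B =====
def reshape_list1d_alt (list1d : List Int) (n : Int) : List (List Int) :=
  let len : Int := list1d.length
  if len < n then []  -- raise ValueError (excluded by Pre_)
  else
    let q := PySem.Int.floordiv len n
    -- rows.setdefault(j, []).append(x) ported as Dict.modify j [] (· ++ [x]):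
    -- exact — same dict after the statement (new key appended, existing key kept in place)
    let rows := (PySem.List.enumerate list1d 0).foldl
      (fun d p =>
        d.modify (if p.1 < n * q then PySem.Int.floordiv p.1 q else p.1 - n * q) []
          (· ++ [p.2]))
      (PySem.Dict.empty : PySem.Dict Int (List Int))
    (PySem.List.pyRange 0 n 1).map (fun j => rows.getD j [])

-- ===== PRECONDITION & SPEC =====
-- Pre_ excludes exactly the inputs where A raises: n = 0 (ZeroDivisionError),
-- len(list1d) < n with n ≥ 1 (the explicit ValueError), and the empty list with
-- n < 0 (range() step-zero ValueError).
def Pre_reshape_list1d (list1d : List Int) (n : Int) : Prop :=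
  n ≠ 0 ∧ n ≤ (list1d.length : Int) ∧ list1d ≠ []
instance (list1d : List Int) (n : Int) : Decidable (Pre_reshape_list1d list1d n) := by
  unfold Pre_reshape_list1d; infer_instance
def pvWitness_reshape_list1d : List Int × Int := ([1, 2, 3, 4, 5], 2)

-- On ([], n) with n < 0, A raises ValueError (range() arg 3 must not be zero) while B returns [].
def Raises_reshape_list1d (list1d : List Int) (n : Int) : Prop := list1d = [] ∧ n < 0
instance (list1d : List Int) (n : Int) : Decidable (Raises_reshape_list1d list1d n) := by
  unfold Raises_reshape_list1d; infer_instance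
def pvRaiseWitness_reshape_list1d : List Int × Int := ([], -1)
def pvRaiseWitnessOut_reshape_list1d : List (List Int) := []

def Spec_reshape_list1d (list1d : List Int) (n : Int) (out : List (List Int)) : Prop :=
  out = reshape_list1d_alt list1d n
instance (list1d : List Int) (n : Int) (out : List (List Int)) : Decidable (Spec_reshape_list1d list1d n out) := by
  unfold Spec_reshape_list1d; infer_instance

-- ===== CLAIM (what is proved, stated in full; the proofs are below) =====
def Claim_equal_reshape_list1d : Prop := ∀ (list1d : List Int) (n : Int),
  Dom_reshape_list1d list1d n → Pre_reshape_list1d list1d n →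
  Spec_reshape_list1d list1d n (reshape_list1d list1d n)
def Claim_raises_reshape_list1d : Prop :=
  (∀ (list1d : List Int) (n : Int), Dom_reshape_list1d list1d n →
      Raises_reshape_list1d list1d n → ¬ Pre_reshape_list1d list1d n) ∧
  (Dom_reshape_list1d (pvRaiseWitness_reshape_list1d.1) (pvRaiseWitness_reshape_list1d.2) ∧
   Raises_reshape_list1d (pvRaiseWitness_reshape_list1d.1) (pvRaiseWitness_reshape_list1d.2) ∧
   reshape_list1d_alt (pvRaiseWitness_reshape_list1d.1) (pvRaiseWitness_reshape_list1d.2) =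
     pvRaiseWitnessOut_reshape_list1d)

-- ===== LEMMAS AND PROOFS =====

-- The common row description both programs are proved equal to:
-- row j = list1d[j*q:(j+1)*q] (+ the j-th tail element when j < r).
def pvSpec (list1d : List Int) (n : Int) : List (List Int) :=
  let len : Int := list1d.length
  let q := PySem.Int.floordiv len n
  let r := PySem.Int.mod len n
  (PySem.List.pyRange 0 n 1).map (fun j =>
    PySem.List.slice list1d (some (j * q)) (some ((j + 1) * q)) ++
      (if j < r then [PySem.List.pyGetD list1d (n * q + j) 0] else []))

-- A's second loop, made structural: extend each of the first (t.length) rows in turn.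
def pvPatch : List (List Int) → List Int → List (List Int)
  | ls, [] => ls
  | [], _ :: _ => []
  | l :: ls, m :: t => (l ++ [m]) :: pvPatch ls t

theorem pvPatch_length (ls : List (List Int)) (t : List Int) :
    (pvPatch ls t).length = ls.length := by
  induction ls generalizing t with
  | nil => cases t <;> simp [pvPatch]
  | cons l ls ih => cases t <;> simp [pvPatch, ih]

theorem pvPatch_getElem (ls : List (List Int)) (t : List Int) (i : Nat)
    (hi : i < ls.length) :
    (pvPatch ls t)[i]'(by rw [pvPatch_length]; exact hi) =
      if h : i < t.length then ls[i] ++ [t[i]] else ls[i] := by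
  induction ls generalizing t i with
  | nil => exact absurd hi (by simp)
  | cons l ls ih =>
    cases t with
    | nil => simp [pvPatch]
    | cons m t =>
      cases i with
      | zero => simp [pvPatch]
      | succ i => simpa [pvPatch] using ih t i (by simpa using hi)

-- A's patch foldl equals pvPatch, tracked with a processed prefix.
theorem foldl_patch_eq (t : List Int) (pre rest : List (List Int))
    (ht : t.length ≤ rest.length) :
    (PySem.List.enumerate t (pre.length : Int)).foldl
      (fun acc p => PySem.List.pySetD acc p.1 (PySem.List.pyGetD acc p.1 [] ++ [p.2]))
      (pre ++ rest)
    = pre ++ pvPatch rest t := by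
  induction t generalizing pre rest with
  | nil => simp [pvPatch, PySem.List.enumerate]
  | cons m t ih =>
    cases rest with
    | nil => simp at ht
    | cons r0 rest =>
      rw [PySem.List.enumerate_cons, List.foldl_cons]
      have hget : PySem.List.pyGetD (pre ++ r0 :: rest) (pre.length : Int) [] = r0 := by
        rw [PySem.List.pyGetD_natCast]
        simp [List.getD]
      have hset : PySem.List.pySetD (pre ++ r0 :: rest) (pre.length : Int) (r0 ++ [m])
          = (pre ++ [r0 ++ [m]]) ++ rest := by
        rw [PySem.List.pySetD_natCast]
        rw [List.set_append_right _ _ (le_refl _)]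
        simp
      rw [hget, hset]
      have hlen : ((pre ++ [r0 ++ [m]]).length : Int) = (pre.length : Int) + 1 := by
        simp
      rw [← hlen, ih (pre ++ [r0 ++ [m]]) rest (by simpa using ht)]
      simp [pvPatch]

-- range(0, N*q, q) for q > 0 is [0, q, …, (N-1)q]
theorem pyRange_mul_pos (N : Nat) (q : Int) (hq : 0 < q) :
    PySem.List.pyRange 0 ((N : Int) * q) q = (List.range N).map (fun k : Nat => (k : Int) * q) := by
  rw [PySem.List.pyRange_of_pos 0 _ hq]
  rcases Nat.eq_zero_or_pos N with h | h
  · subst h; simp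
  · have hb : (0 : Int) < (N : Int) * q := by positivity
    rw [if_pos hb]
    have h1 : ((N : Int) * q - 0 + q - 1) / q = (N : Int) := by
      rw [show (N : Int) * q - 0 + q - 1 = (q - 1) + (N : Int) * q by ring,
        Int.add_mul_ediv_right _ _ (by omega : q ≠ 0),
        Int.ediv_eq_zero_of_lt (by omega) (by omega)]
      simp
    rw [h1, Int.toNat_natCast]
    simp [mul_comm]

-- ---- A = pvSpec ----

theorem reshape_list1d_neg (list1d : List Int) (n : Int)
    (hne : list1d ≠ []) (hneg : n < 0) :
    reshape_list1d list1d n = pvSpec list1d n := by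
  have hL1 : (1 : Int) ≤ (list1d.length : Int) := by
    have : list1d.length ≠ 0 := fun h => hne (List.eq_nil_of_length_eq_zero h)
    omega
  have hnotlt : ¬ ((list1d.length : Int) < n) := by omega
  have hq : PySem.Int.floordiv (list1d.length : Int) n < 0 := by
    have h1 := PySem.Int.floordiv_mul_add_mod (list1d.length : Int) n
    have h2 := PySem.Int.mod_neg_bounds (a := (list1d.length : Int)) (b := n) hneg
    nlinarith [h2.1, h2.2]
  have hr := PySem.Int.mod_neg_bounds (a := (list1d.length : Int)) (b := n) hneg
  simp only [reshape_list1d, pvSpec, if_neg hnotlt]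
  rw [PySem.List.pyRange_of_neg _ _ hq, PySem.List.pyRange_one_eq_nil (by omega)]
  rw [if_neg (not_lt.mpr hr.2)]
  rw [if_neg (show ¬ ((list1d.length : Int) - PySem.Int.mod (list1d.length : Int) n < 0) by
    have := hr.2; omega)]
  simp

theorem reshape_list1d_pos (list1d : List Int) (n : Int)
    (hpos : 0 < n) (hnle : n ≤ (list1d.length : Int)) :
    reshape_list1d list1d n = pvSpec list1d n := by
  have hnotlt : ¬ ((list1d.length : Int) < n) := by omega
  have hr0 : 0 ≤ PySem.Int.mod (list1d.length : Int) n := PySem.Int.mod_nonneg _ hpos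
  have hrn : PySem.Int.mod (list1d.length : Int) n < n := PySem.Int.mod_lt _ hpos
  have hqr := PySem.Int.floordiv_mul_add_mod (list1d.length : Int) n
  have hq1 : 1 ≤ PySem.Int.floordiv (list1d.length : Int) n := by nlinarith
  have hNn : ((n.toNat : Nat) : Int) = n := Int.toNat_of_nonneg (by omega)
  have hRr : (((PySem.Int.mod (list1d.length : Int) n).toNat : Nat) : Int) =
      PySem.Int.mod (list1d.length : Int) n := Int.toNat_of_nonneg hr0
  have hRN : (PySem.Int.mod (list1d.length : Int) n).toNat < n.toNat := by omega
  have hRlen : (PySem.Int.mod (list1d.length : Int) n).toNat ≤ list1d.length := by omega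
  simp only [reshape_list1d, pvSpec, if_neg hnotlt]
  rw [PySem.List.foldl_append_singleton_eq_map, List.nil_append]
  rw [show (list1d.length : Int) - PySem.Int.mod (list1d.length : Int) n =
      ((n.toNat : Nat) : Int) * PySem.Int.floordiv (list1d.length : Int) n by
    rw [hNn]; linarith]
  rw [pyRange_mul_pos _ _ (by omega), List.map_map, PySem.List.pyRange_one, List.map_map]
  rw [show ((n : Int) - 0).toNat = n.toNat by omega]
  by_cases hrz : PySem.Int.mod (list1d.length : Int) n > 0
  · rw [if_pos hrz]
    -- tail of the list: list1d[-r:]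
    rw [show -PySem.Int.mod (list1d.length : Int) n =
        -(((PySem.Int.mod (list1d.length : Int) n).toNat : Nat) : Int) by rw [hRr]]
    rw [PySem.List.slice_from_neg_natCast _ _ (by omega)]
    have ht : (list1d.drop (list1d.length - (PySem.Int.mod (list1d.length : Int) n).toNat)).length
        = (PySem.Int.mod (list1d.length : Int) n).toNat := by
      simp; omega
    have hfold := foldl_patch_eq
      (list1d.drop (list1d.length - (PySem.Int.mod (list1d.length : Int) n).toNat)) []
      ((List.range n.toNat).map
        ((fun i => PySem.List.slice list1d (some i)
            (some (i + PySem.Int.floordiv (list1d.length : Int) n))) ∘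
          fun k : Nat => (k : Int) * PySem.Int.floordiv (list1d.length : Int) n))
      (by simp [ht]; omega)
    simp only [List.length_nil, Int.natCast_zero, List.nil_append] at hfold
    rw [hfold]
    apply List.ext_getElem
    · simp [pvPatch_length]
    · intro i h1 h2
      have hiN : i < n.toNat := by
        have h := h2
        simp only [List.length_map, List.length_range] at h
        exact h
      rw [pvPatch_getElem _ _ _ (by simp only [List.length_map, List.length_range]; exact hiN)]
      simp only [List.getElem_map, List.getElem_range, Function.comp_apply, zero_add]
      by_cases hiR : i <
          (List.drop (list1d.length - (PySem.Int.mod (list1d.length : Int) n).toNat) list1d).length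
      · rw [dif_pos hiR]
        rw [ht] at hiR
        rw [if_pos (by omega : ((i : Int)) < PySem.Int.mod (list1d.length : Int) n)]
        congr 1
        · congr 1 <;> congr 1 <;> ring
        · -- tail element: t[i] = list1d[n*q + i]
          rw [List.getElem_drop]
          have hidx : n * PySem.Int.floordiv (list1d.length : Int) n + (i : Int) =
              (((list1d.length - (PySem.Int.mod (list1d.length : Int) n).toNat + i : Nat)) : Int) := by
            have hmul : n * PySem.Int.floordiv (list1d.length : Int) n =
                (list1d.length : Int) - PySem.Int.mod (list1d.length : Int) n := by
              rw [mul_comm]; linarith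
            push_cast; omega
          rw [hidx, PySem.List.pyGetD_natCast]
          rw [List.getD_eq_getElem _ _ (by omega)]
      · rw [dif_neg hiR]
        rw [ht] at hiR
        rw [if_neg (by omega : ¬ ((i : Int)) < PySem.Int.mod (list1d.length : Int) n)]
        rw [List.append_nil]
        congr 1 <;> congr 1 <;> ring
  · rw [if_neg hrz]
    apply List.map_congr_left
    intro k hk
    simp only [Function.comp_apply, zero_add]
    rw [if_neg (by omega : ¬ ((k : Int)) < PySem.Int.mod (list1d.length : Int) n)]
    rw [List.append_nil]
    congr 1 <;> congr 1 <;> ring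

-- ---- B = pvSpec ----

-- The grouping loop read off at one key: the values whose computed key is c, in order.
theorem getD_group (l : List (Int × Int)) (key : Int × Int → Int) (c : Int) :
    ((l.foldl (fun d p => d.modify (key p) [] (· ++ [p.2]))
        (PySem.Dict.empty : PySem.Dict Int (List Int))).getD c [])
      = (l.filter (fun p => key p == c)).map (·.2) := by
  have h1 : l.foldl (fun d p => d.modify (key p) [] (· ++ [p.2]))
        (PySem.Dict.empty : PySem.Dict Int (List Int))
      = (l.map (fun p => (key p, p.2))).foldl
          (fun d p => d.modify p.1 [] (· ++ [p.2])) PySem.Dict.empty := by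
    rw [List.foldl_map]
  rw [h1, PySem.Dict.getD_foldl_modify_append, List.filter_map, List.map_map]
  simp [Function.comp_def]

-- indices a ≤ i < b read off a list is the slice xs[a:b]
theorem map_pyGetD_pyRange_slice (xs : List Int) (a b : Int)
    (ha : 0 ≤ a) (hab : a ≤ b) (hb : b ≤ (xs.length : Int)) :
    (PySem.List.pyRange a b 1).map (fun i => PySem.List.pyGetD xs i 0)
      = PySem.List.slice xs (some a) (some b) := by
  rw [PySem.List.pyRange_one, List.map_map,
    PySem.List.slice_of_nonneg xs ha (by omega) (by omega) hb]
  apply List.ext_getElem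
  · simp; omega
  · intro k h1 h2
    simp only [List.getElem_map, List.getElem_range, Function.comp_apply]
    have hk : k < (b - a).toNat := by simpa using h1
    have hcast : a + (k : Int) = ((a.toNat + k : Nat) : Int) := by push_cast; omega
    rw [hcast, PySem.List.pyGetD_natCast]
    rw [List.getElem_take, List.getElem_drop]
    rw [List.getD_eq_getElem _ _ (by omega)]

theorem reshape_list1d_alt_pos (list1d : List Int) (n : Int)
    (hpos : 0 < n) (hnle : n ≤ (list1d.length : Int)) :
    reshape_list1d_alt list1d n = pvSpec list1d n := by
  have hnotlt : ¬ ((list1d.length : Int) < n) := by omega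
  simp only [reshape_list1d_alt, pvSpec, if_neg hnotlt]
  set q := PySem.Int.floordiv (list1d.length : Int) n with hqdef
  set r := PySem.Int.mod (list1d.length : Int) n with hrdef
  have hr0 : 0 ≤ r := PySem.Int.mod_nonneg _ hpos
  have hrn : r < n := PySem.Int.mod_lt _ hpos
  have hqr : q * n + r = (list1d.length : Int) := PySem.Int.floordiv_mul_add_mod _ _
  have hq1 : 1 ≤ q := by nlinarith
  apply List.map_congr_left
  intro j hj
  rw [PySem.List.mem_pyRange_one] at hj
  -- read the dict at key j
  rw [getD_group (PySem.List.enumerate list1d 0)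
    (fun p => if p.1 < n * q then PySem.Int.floordiv p.1 q else p.1 - n * q) j]
  -- push the filter through enumerate = map over the index range
  rw [PySem.List.enumerate_eq_map_pyRange (d := 0), List.filter_map, List.map_map,
    PySem.List.len_eq]
  have hcomp :
      ((fun p : Int × Int => if p.1 < n * q then PySem.Int.floordiv p.1 q else p.1 - n * q)
          ∘ fun j => (j, PySem.List.pyGetD list1d j 0))
        = fun i : Int => if i < n * q then PySem.Int.floordiv i q else i - n * q := rfl
  have hcomp2 : ((fun p : Int × Int => p.2) ∘ fun j => (j, PySem.List.pyGetD list1d j 0))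
        = fun i : Int => PySem.List.pyGetD list1d i 0 := rfl
  simp only [Function.comp_def]
  -- split the index range at n*q
  have hsplit : PySem.List.pyRange 0 (list1d.length : Int) 1
      = PySem.List.pyRange 0 (n * q) 1 ++ PySem.List.pyRange (n * q) (list1d.length : Int) 1 := by
    exact PySem.List.pyRange_one_append 0 (n * q) _ (by nlinarith) (by nlinarith)
  rw [hsplit, List.filter_append, List.map_append]
  -- body part: indices with i // q = j, i.e. j*q ≤ i < (j+1)*q
  have hbody : (PySem.List.pyRange 0 (n * q) 1).filter
        (fun i => (if i < n * q then PySem.Int.floordiv i q else i - n * q) == j)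
      = PySem.List.pyRange (j * q) ((j + 1) * q) 1 := by
    have hsplit2 : PySem.List.pyRange 0 (n * q) 1
        = (PySem.List.pyRange 0 (j * q) 1 ++ PySem.List.pyRange (j * q) ((j + 1) * q) 1)
            ++ PySem.List.pyRange ((j + 1) * q) (n * q) 1 := by
      rw [PySem.List.pyRange_one_append 0 (j * q) (n * q)
            (mul_nonneg hj.1 (by omega)) (by nlinarith),
          PySem.List.pyRange_one_append (j * q) ((j + 1) * q) (n * q)
            (by nlinarith) (by nlinarith),
          List.append_assoc]
    rw [hsplit2, List.filter_append, List.filter_append]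
    have hfd : ∀ i : Int, j * q ≤ i → i < (j + 1) * q → PySem.Int.floordiv i q = j := by
      intro i h1 h2
      exact (PySem.Int.floordiv_eq_iff_of_pos (by omega)).mpr ⟨h1, h2⟩
    have h1 : (PySem.List.pyRange 0 (j * q) 1).filter
          (fun i => (if i < n * q then PySem.Int.floordiv i q else i - n * q) == j) = [] := by
      apply List.filter_eq_nil_iff.mpr
      intro i hi
      rw [PySem.List.mem_pyRange_one] at hi
      have hlt : i < n * q := by nlinarith
      have : PySem.Int.floordiv i q < j :=
        (PySem.Int.floordiv_lt_iff_lt_mul (by omega)).mpr hi.2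
      simp [if_pos hlt]; omega
    have h2 : (PySem.List.pyRange (j * q) ((j + 1) * q) 1).filter
          (fun i => (if i < n * q then PySem.Int.floordiv i q else i - n * q) == j)
        = PySem.List.pyRange (j * q) ((j + 1) * q) 1 := by
      apply List.filter_eq_self.mpr
      intro i hi
      rw [PySem.List.mem_pyRange_one] at hi
      have hlt : i < n * q := by nlinarith
      simp [if_pos hlt, hfd i hi.1 hi.2]
    have h3 : (PySem.List.pyRange ((j + 1) * q) (n * q) 1).filter
          (fun i => (if i < n * q then PySem.Int.floordiv i q else i - n * q) == j) = [] := by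
      apply List.filter_eq_nil_iff.mpr
      intro i hi
      rw [PySem.List.mem_pyRange_one] at hi
      have hlt : i < n * q := hi.2
      have : j < PySem.Int.floordiv i q := by
        have := (PySem.Int.le_floordiv_iff_mul_le (q := j + 1) (a := i) (b := q) (by omega)).mpr hi.1
        omega
      simp [if_pos hlt]; omega
    rw [h1, h2, h3]
    simp
  -- tail part: indices ≥ n*q with i - n*q = j, i.e. the single index n*q + j when j < r
  have htail : (PySem.List.pyRange (n * q) (list1d.length : Int) 1).filter
        (fun i => (if i < n * q then PySem.Int.floordiv i q else i - n * q) == j)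
      = if j < r then [n * q + j] else [] := by
    by_cases hjr : j < r
    · rw [if_pos hjr]
      have hsplit3 : PySem.List.pyRange (n * q) (list1d.length : Int) 1
          = (PySem.List.pyRange (n * q) (n * q + j) 1
              ++ PySem.List.pyRange (n * q + j) (n * q + j + 1) 1)
              ++ PySem.List.pyRange (n * q + j + 1) (list1d.length : Int) 1 := by
        rw [PySem.List.pyRange_one_append (n * q) (n * q + j) _
              (by omega) (by nlinarith),
            PySem.List.pyRange_one_append (n * q + j) (n * q + j + 1) _
              (by omega) (by nlinarith),
            List.append_assoc]
      rw [hsplit3, List.filter_append, List.filter_append]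
      have h1 : (PySem.List.pyRange (n * q) (n * q + j) 1).filter
            (fun i => (if i < n * q then PySem.Int.floordiv i q else i - n * q) == j) = [] := by
        apply List.filter_eq_nil_iff.mpr
        intro i hi
        rw [PySem.List.mem_pyRange_one] at hi
        simp [if_neg (by omega : ¬ i < n * q)]; omega
      have h2 : (PySem.List.pyRange (n * q + j) (n * q + j + 1) 1).filter
            (fun i => (if i < n * q then PySem.Int.floordiv i q else i - n * q) == j)
          = [n * q + j] := by
        rw [PySem.List.pyRange_one_singleton]
        apply List.filter_eq_self.mpr
        intro i hi
        simp only [List.mem_singleton] at hi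
        subst hi
        rw [if_neg (by omega : ¬ n * q + j < n * q)]
        have harith : n * q + j - n * q = j := by ring
        rw [harith]
        simp
      have h3 : (PySem.List.pyRange (n * q + j + 1) (list1d.length : Int) 1).filter
            (fun i => (if i < n * q then PySem.Int.floordiv i q else i - n * q) == j) = [] := by
        apply List.filter_eq_nil_iff.mpr
        intro i hi
        rw [PySem.List.mem_pyRange_one] at hi
        simp [if_neg (by omega : ¬ i < n * q)]; omega
      rw [h1, h2, h3]
      simp
    · rw [if_neg hjr]
      apply List.filter_eq_nil_iff.mpr
      intro i hi
      rw [PySem.List.mem_pyRange_one] at hi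
      have hineq : i < n * q + r := by nlinarith
      simp [if_neg (by omega : ¬ i < n * q)]; omega
  rw [hbody, htail]
  congr 1
  · exact map_pyGetD_pyRange_slice list1d (j * q) ((j + 1) * q)
      (mul_nonneg hj.1 (by omega)) (by nlinarith) (by nlinarith)
  · by_cases hjr : j < r
    · simp [if_pos hjr]
    · simp [if_neg hjr]

theorem reshape_list1d_alt_neg (list1d : List Int) (n : Int)
    (hne : list1d ≠ []) (hneg : n < 0) :
    reshape_list1d_alt list1d n = pvSpec list1d n := by
  have hL1 : (1 : Int) ≤ (list1d.length : Int) := by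
    have : list1d.length ≠ 0 := fun h => hne (List.eq_nil_of_length_eq_zero h)
    omega
  have hnotlt : ¬ ((list1d.length : Int) < n) := by omega
  simp only [reshape_list1d_alt, pvSpec, if_neg hnotlt]
  rw [PySem.List.pyRange_one_eq_nil (by omega)]
  simp

-- ===== VERDICT =====
theorem reshape_list1d_spec : Claim_equal_reshape_list1d := by
  intro list1d n _hdom hpre
  obtain ⟨hn0, hnle, hne⟩ := hpre
  unfold Spec_reshape_list1d
  rcases lt_or_gt_of_ne hn0 with hneg | hpos
  · rw [reshape_list1d_neg list1d n hne hneg, reshape_list1d_alt_neg list1d n hne hneg]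
  · rw [reshape_list1d_pos list1d n hpos hnle, reshape_list1d_alt_pos list1d n hpos hnle]

@[simp] theorem reshape_list1d_raises : Claim_raises_reshape_list1d := by
  unfold Claim_raises_reshape_list1d
  exact ⟨fun list1d n _ h hp => hp.2.2 h.1, by decide⟩
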